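-- pv_equiv track=rewrite | github.com/natsuyasai/lazygitlab | lazygitlab/tui/widgets/_diff_parser.py | _find_first_last_new_line
-- ===== SOURCE A (Python) =====
-- def _find_first_last_new_line(
--     parsed: list[tuple[str, int | None, int | None, str]],
-- ) -> tuple[int, int]:
--     """パース済み diff の新ファイル側の最初と最後の行番号を返す (0 = 未検出)。"""
--     first = last = 0
--     for _, _, new_n, _ in parsed:
--         if new_n is not None:
--             if first == 0:
--                 first = new_n
--             last = new_n
--     return first, last
-- ===== SOURCE B (Python) =====
-- def _find_first_last_new_line(parsed):
--     """First and last new-file line numbers via two endpoint searches (0 = not found)."""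
--     first = next((n for _, _, n, _ in parsed if n), 0)
--     last = 0
--     for _, _, n, _ in reversed(parsed):
--         if n is not None:
--             last = n
--             break
--     return first, last
-- ===== Notes on version B (the rewrite author's own statement) =====
-- stated objective: alternative
-- what changed: Replaced A's single accumulating pass carrying (first,last) state by two independent endpoint searches: a forward generator for the first truthy new_n and a reversed-iteration break on the first non-None new_n.
import Mathlib
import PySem

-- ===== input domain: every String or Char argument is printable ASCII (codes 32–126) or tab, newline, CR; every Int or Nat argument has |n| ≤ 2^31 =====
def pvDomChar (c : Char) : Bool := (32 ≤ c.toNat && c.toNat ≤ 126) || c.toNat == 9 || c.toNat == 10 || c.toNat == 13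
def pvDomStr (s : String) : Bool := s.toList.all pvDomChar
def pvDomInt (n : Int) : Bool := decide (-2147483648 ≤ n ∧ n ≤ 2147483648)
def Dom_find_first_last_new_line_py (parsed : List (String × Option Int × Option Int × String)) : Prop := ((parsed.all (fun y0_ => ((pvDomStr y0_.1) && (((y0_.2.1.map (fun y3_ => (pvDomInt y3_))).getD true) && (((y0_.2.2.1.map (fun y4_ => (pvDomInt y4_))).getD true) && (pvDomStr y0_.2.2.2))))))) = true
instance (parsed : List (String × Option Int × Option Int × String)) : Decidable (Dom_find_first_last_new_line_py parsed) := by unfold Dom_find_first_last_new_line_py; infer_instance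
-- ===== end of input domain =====

-- ===== PORT A =====
-- A: one accumulating pass over parsed, carrying (first, last).
def find_first_last_new_line_py (parsed : List (String × Option Int × Option Int × String)) : Int × Int :=
  parsed.foldl (fun (st : Int × Int) t =>
    match t.2.2.1 with
    | some n => (if st.1 = 0 then n else st.1, n)
    | none => st) (0, 0)

-- ===== PORT B =====
-- B: two independent endpoint searches (forward for first truthy, backward for first non-None).
def pvFirstNZ : List (String × Option Int × Option Int × String) → Int
  | [] => 0
  | t :: rest =>
    match t.2.2.1 with
    | some n => if n ≠ 0 then n else pvFirstNZ rest
    | none => pvFirstNZ rest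

def pvLastNN : List (String × Option Int × Option Int × String) → Int
  | [] => 0
  | t :: rest =>
    match t.2.2.1 with
    | some n => n
    | none => pvLastNN rest

def find_first_last_new_line_py_alt (parsed : List (String × Option Int × Option Int × String)) : Int × Int :=
  (pvFirstNZ parsed, pvLastNN parsed.reverse)

-- ===== PRECONDITION & SPEC =====
def Spec_find_first_last_new_line_py (parsed : List (String × Option Int × Option Int × String)) (out : Int × Int) : Prop := out = find_first_last_new_line_py_alt parsed
instance (parsed : List (String × Option Int × Option Int × String)) (out : Int × Int) : Decidable (Spec_find_first_last_new_line_py parsed out) := by unfold Spec_find_first_last_new_line_py; infer_instance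

-- ===== CLAIM (what is proved, stated in full; the proofs are below) =====
def Claim_equal_find_first_last_new_line_py : Prop := ∀ (parsed : List (String × Option Int × Option Int × String)), Dom_find_first_last_new_line_py parsed → Spec_find_first_last_new_line_py parsed (find_first_last_new_line_py parsed)

-- ===== LEMMAS AND PROOFS =====
theorem pvLastNN_append (ys zs : List (String × Option Int × Option Int × String)) :
    pvLastNN (ys ++ zs) = (if ys.any (fun t => t.2.2.1.isSome) then pvLastNN ys else pvLastNN zs) := by
  induction ys with
  | nil => simp
  | cons t rest ih =>
    cases h : t.2.2.1 with
    | some n => simp [pvLastNN, h]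
    | none =>
      simp only [List.cons_append, pvLastNN, h, ih, List.any_cons, Option.isSome_none,
        Bool.false_or]

theorem pvLastNN_eq_zero (xs : List (String × Option Int × Option Int × String))
    (h : xs.any (fun t => t.2.2.1.isSome) = false) : pvLastNN xs = 0 := by
  induction xs with
  | nil => rfl
  | cons t rest ih =>
    simp only [List.any_cons, Bool.or_eq_false_iff] at h
    cases ho : t.2.2.1 with
    | some n => simp [ho] at h
    | none => simp [pvLastNN, ho, ih h.2]

theorem pvLoop_eq (parsed : List (String × Option Int × Option Int × String)) (f l : Int) :
    parsed.foldl (fun (st : Int × Int) t =>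
      match t.2.2.1 with
      | some n => (if st.1 = 0 then n else st.1, n)
      | none => st) (f, l)
    = ((if f = 0 then pvFirstNZ parsed else f),
       (if parsed.any (fun t => t.2.2.1.isSome) then pvLastNN parsed.reverse else l)) := by
  induction parsed generalizing f l with
  | nil => simp [pvFirstNZ]
  | cons t rest ih =>
    cases h : t.2.2.1 with
    | none =>
      simp only [List.foldl_cons, h, ih, List.any_cons, Option.isSome_none, Bool.false_or,
        List.reverse_cons, pvLastNN_append, List.any_reverse, Prod.mk.injEq]
      constructor
      · simp [pvFirstNZ, h]
      · split_ifs with h1 <;> simp_all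
    | some n =>
      simp only [List.foldl_cons, h, ih, List.any_cons, Option.isSome_some, Bool.true_or,
        List.reverse_cons, pvLastNN_append, List.any_reverse, if_pos, Prod.mk.injEq]
      constructor
      · by_cases hf : f = 0
        · simp only [hf, pvFirstNZ, h]
          by_cases hn : n = 0 <;> simp [hn]
        · simp [hf]
      · split_ifs with h1 <;> simp [pvLastNN, h]

-- ===== VERDICT (by name: the statement is the Claim_ definition above) =====
theorem find_first_last_new_line_py_spec : Claim_equal_find_first_last_new_line_py := by
  intro parsed _
  unfold Spec_find_first_last_new_line_py find_first_last_new_line_py find_first_last_new_line_py_alt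
  rw [pvLoop_eq]
  by_cases hany : parsed.any (fun t => t.2.2.1.isSome) = true
  · simp [hany]
  · have h0 : pvLastNN parsed.reverse = 0 :=
      pvLastNN_eq_zero _ (by simp [List.any_reverse]; simpa using hany)
    simp [hany, h0]
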